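-- pv_equiv track=rewrite | github.com/leolion3/advent-of-code-2025 | 05-cafeteria/sol.py | solve
-- ===== SOURCE A (Python) =====
-- from typing import List, Set
--
-- def solve(ranges: List[List[int]], inputs: List[int], part_2: bool = False) -> int:
-- 	_sum: int = 0
-- 	if part_2:
-- 		for _range in ranges:
-- 			_sum += _range[1] + 1 - _range[0]
-- 		return _sum
-- 	for i in inputs:
-- 		for _range in ranges:
-- 			if _range[0] <= i <= _range[1]:
-- 				_sum += 1
-- 				break
-- 	return _sum
-- ===== SOURCE B (Python) =====
-- from typing import List
--
--
-- def _bisect_right(a: List[int], x: int) -> int: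
-- 	lo, hi = 0, len(a)
-- 	while lo < hi:
-- 		mid = (lo + hi) // 2
-- 		if x < a[mid]:
-- 			hi = mid
-- 		else:
-- 			lo = mid + 1
-- 	return lo
--
--
-- def solve(ranges: List[List[int]], inputs: List[int], part_2: bool = False) -> int:
-- 	if part_2:
-- 		return sum(r[1] + 1 - r[0] for r in ranges)
-- 	intervals = sorted(((r[0], r[1]) for r in ranges), key=lambda t: t[0])
-- 	merged: List[tuple] = []
-- 	cur = None
-- 	for s, e in intervals:
-- 		if cur is None:
-- 			cur = (s, e)
-- 		elif s <= cur[1]: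
-- 			cur = (cur[0], max(cur[1], e))
-- 		else:
-- 			merged.append(cur)
-- 			cur = (s, e)
-- 	if cur is not None:
-- 		merged.append(cur)
-- 	starts = [p[0] for p in merged]
-- 	count = 0
-- 	for i in inputs:
-- 		j = _bisect_right(starts, i)
-- 		if j and i <= merged[j - 1][1]:
-- 			count += 1
-- 	return count
-- ===== Notes on version B (the rewrite author's own statement) =====
-- stated objective: alternative
-- what changed: B sorts the ranges once, merges them into disjoint intervals, and binary-searches each input in the merged starts, instead of scanning every range for every input.
-- outside the precondition, e.g. on solve([[5]], [3], False): A returns 0, B raises IndexError; on solve([[0, 10], [5]], [3], False): A returns 1, B raises IndexError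
import Mathlib
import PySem

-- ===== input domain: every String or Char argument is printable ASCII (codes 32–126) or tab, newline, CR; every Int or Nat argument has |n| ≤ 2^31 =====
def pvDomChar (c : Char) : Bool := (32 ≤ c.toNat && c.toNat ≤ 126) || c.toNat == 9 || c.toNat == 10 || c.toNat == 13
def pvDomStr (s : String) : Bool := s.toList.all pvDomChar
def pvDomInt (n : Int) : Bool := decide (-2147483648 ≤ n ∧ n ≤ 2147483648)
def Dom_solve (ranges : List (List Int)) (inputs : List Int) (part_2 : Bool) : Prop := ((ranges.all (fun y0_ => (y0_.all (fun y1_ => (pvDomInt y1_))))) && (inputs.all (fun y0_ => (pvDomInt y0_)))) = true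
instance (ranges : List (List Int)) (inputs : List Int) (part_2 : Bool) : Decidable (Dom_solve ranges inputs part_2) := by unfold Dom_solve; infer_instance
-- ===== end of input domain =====

-- B sorts and merges the ranges once into disjoint intervals and binary-searches each input instead of scanning all ranges per input (objective: alternative).

-- ===== PORT A =====
-- inner loop 'for _range in ranges: if _range[0] <= i <= _range[1]: _sum += 1; break' as a first-hit scan
def solveScanA (ranges : List (List Int)) (i : Int) : Int :=
  match ranges with
  | [] => 0
  | r :: t =>
      if PySem.List.pyGetD r 0 0 ≤ i ∧ i ≤ PySem.List.pyGetD r 1 0 then 1 else solveScanA t i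

def solve (ranges : List (List Int)) (inputs : List Int) (part_2 : Bool) : Int :=
  if part_2 then
    ranges.foldl (fun s r => s + (PySem.List.pyGetD r 1 0 + 1 - PySem.List.pyGetD r 0 0)) 0
  else
    inputs.foldl (fun s i => s + solveScanA ranges i) 0

-- ===== PORT B =====
-- one step of Source B's merge loop; state = (merged so far, current open interval)
def solveMergeStep (acc : List (Int × Int) × Option (Int × Int)) (p : Int × Int) :
    List (Int × Int) × Option (Int × Int) :=
  match acc.2 with
  | none => (acc.1, some p)
  | some c => if p.1 ≤ c.2 then (acc.1, some (c.1, max c.2 p.2)) else (acc.1 ++ [c], some p)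

-- Source B's trailing 'if cur is not None: merged.append(cur)'
def solveMergeFin (st : List (Int × Int) × Option (Int × Int)) : List (Int × Int) :=
  match st.2 with
  | none => st.1
  | some c => st.1 ++ [c]

def solve_alt (ranges : List (List Int)) (inputs : List Int) (part_2 : Bool) : Int :=
  if part_2 then
    (ranges.map (fun r => PySem.List.pyGetD r 1 0 + 1 - PySem.List.pyGetD r 0 0)).sum
  else
    let intervals :=
      PySem.List.sorted
        (ranges.map (fun r => (PySem.List.pyGetD r 0 0, PySem.List.pyGetD r 1 0)))
        (fun t => t.1)
    let merged := solveMergeFin (intervals.foldl solveMergeStep ([], none))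
    let starts := merged.map (fun p => p.1)
    inputs.foldl
      (fun cnt i =>
        let j := PySem.List.bisectRight starts i
        if 0 < j ∧ i ≤ (merged.getD (j - 1) (0, 0)).2 then cnt + 1 else cnt)
      0

-- ===== PRECONDITION & SPEC =====
-- Pre_ excludes range lists containing an inner list shorter than 2: Python A raises IndexError on
-- most of these, and on the rest (the short range is never fully indexed thanks to an empty input
-- list, comparison short-circuit or an earlier break) B itself raises IndexError while building the
-- intervals, so no common value exists to claim.
def Pre_solve (ranges : List (List Int)) (inputs : List Int) (part_2 : Bool) : Prop :=
  ∀ r ∈ ranges, 2 ≤ r.length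
instance (ranges : List (List Int)) (inputs : List Int) (part_2 : Bool) :
    Decidable (Pre_solve ranges inputs part_2) := by unfold Pre_solve; infer_instance

def pvWitness_solve : List (List Int) × List Int × Bool := ([[0, 5], [3, 7]], ([1, 9], false))

def Spec_solve (ranges : List (List Int)) (inputs : List Int) (part_2 : Bool) (out : Int) : Prop :=
  out = solve_alt ranges inputs part_2
instance (ranges : List (List Int)) (inputs : List Int) (part_2 : Bool) (out : Int) :
    Decidable (Spec_solve ranges inputs part_2 out) := by unfold Spec_solve; infer_instance

-- ===== CLAIM (what is proved, stated in full; the proofs are below) =====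
def Claim_equal_solve : Prop := ∀ (ranges : List (List Int)) (inputs : List Int) (part_2 : Bool), Dom_solve ranges inputs part_2 → Pre_solve ranges inputs part_2 → Spec_solve ranges inputs part_2 (solve ranges inputs part_2)

-- ===== LEMMAS AND PROOFS =====

-- the order kept between consecutive merged intervals: later interval starts strictly past the end
def solveMergeRel (p q : Int × Int) : Prop := p.1 ≤ q.1 ∧ p.2 < q.1

lemma scanA_eq (ranges : List (List Int)) (i : Int) :
    solveScanA ranges i =
      if (ranges.map (fun r => (PySem.List.pyGetD r 0 0, PySem.List.pyGetD r 1 0))).any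
          (fun p => decide (p.1 ≤ i ∧ i ≤ p.2)) then (1 : Int) else 0 := by
  induction ranges with
  | nil => simp [solveScanA]
  | cons r t ih =>
      simp only [solveScanA, ih, List.map_cons, List.any_cons]
      by_cases h : PySem.List.pyGetD r 0 0 ≤ i ∧ i ≤ PySem.List.pyGetD r 1 0
      · simp [h]
      · simp [h]

lemma merge_main (l done : List (Int × Int)) (cur : Option (Int × Int))
    (hl : l.Pairwise (fun a b => a.1 ≤ b.1))
    (hdone : done.Pairwise solveMergeRel)
    (hcur : ∀ c, cur = some c → (∀ p ∈ done, solveMergeRel p c) ∧ ∀ q ∈ l, c.1 ≤ q.1)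
    (hnone : cur = none → done = []) :
    (solveMergeFin (l.foldl solveMergeStep (done, cur))).Pairwise solveMergeRel ∧
    (∀ i : Int,
      (∃ p ∈ solveMergeFin (l.foldl solveMergeStep (done, cur)), p.1 ≤ i ∧ i ≤ p.2) ↔
        ((∃ p ∈ done, p.1 ≤ i ∧ i ≤ p.2) ∨ (∃ c, cur = some c ∧ c.1 ≤ i ∧ i ≤ c.2) ∨
          (∃ p ∈ l, p.1 ≤ i ∧ i ≤ p.2))) := by
  induction l generalizing done cur with
  | nil =>
      cases cur with
      | none =>
          have hd := hnone rfl
          subst hd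
          constructor
          · simp [solveMergeFin]
          · intro i; simp [solveMergeFin]
      | some c =>
          constructor
          · simp only [List.foldl_nil, solveMergeFin]
            refine List.pairwise_append.mpr ⟨hdone, by simp, ?_⟩
            intro p hp q hq
            simp only [List.mem_singleton] at hq
            subst hq
            exact (hcur _ rfl).1 p hp
          · intro i
            simp only [List.foldl_nil, solveMergeFin, List.mem_append, List.mem_singleton,
              List.not_mem_nil]
            constructor
            · rintro ⟨p, hp | hp, hc⟩
              · exact Or.inl ⟨p, hp, hc⟩
              · exact Or.inr (Or.inl ⟨p, by simp [hp], hc⟩)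
            · rintro (⟨p, hp, hc⟩ | ⟨c', hc', hcov⟩ | ⟨p, hp, _⟩)
              · exact ⟨p, Or.inl hp, hc⟩
              · obtain rfl : c = c' := by injection hc'
                exact ⟨c, Or.inr rfl, hcov⟩
              · simp at hp
  | cons q t ih =>
      obtain ⟨s, e⟩ := q
      rw [List.pairwise_cons] at hl
      obtain ⟨hhead, ht⟩ := hl
      cases cur with
      | none =>
          have hd := hnone rfl; subst hd
          have hstep : (((s, e) :: t).foldl solveMergeStep ([], none)) =
              t.foldl solveMergeStep ([], some (s, e)) := by
            simp [solveMergeStep]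
          rw [hstep]
          have hres := ih [] (some (s, e)) ht (by simp)
            (by intro c hc; injection hc with hc; subst hc; exact ⟨by simp, fun q hq => hhead q hq⟩)
            (by intro h; cases h)
          refine ⟨hres.1, fun i => ?_⟩
          rw [(hres.2 i)]
          constructor
          · rintro (h | ⟨c, hc, hcov⟩ | ⟨p, hp, hcov⟩)
            · simp at h
            · obtain rfl : (s, e) = c := by injection hc
              exact Or.inr (Or.inr ⟨(s, e), by simp, hcov⟩)
            · exact Or.inr (Or.inr ⟨p, by simp [hp], hcov⟩)
          · rintro (⟨p, hp, _⟩ | ⟨c, hc, _⟩ | ⟨p, hp, hcov⟩)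
            · simp at hp
            · cases hc
            · rcases List.mem_cons.mp hp with rfl | hp
              · exact Or.inr (Or.inl ⟨(s, e), rfl, hcov⟩)
              · exact Or.inr (Or.inr ⟨p, hp, hcov⟩)
      | some c =>
          obtain ⟨cs, ce⟩ := c
          obtain ⟨hRdone, hle⟩ := hcur (cs, ce) rfl
          have hcs_s : cs ≤ s := hle (s, e) (List.mem_cons_self ..)
          by_cases hov : s ≤ ce
          · -- extend the current interval
            have hstep : (((s, e) :: t).foldl solveMergeStep (done, some (cs, ce))) =
                t.foldl solveMergeStep (done, some (cs, max ce e)) := by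
              simp [solveMergeStep, hov]
            rw [hstep]
            have hres := ih done (some (cs, max ce e)) ht hdone
              (by
                intro c hc; injection hc with hc; subst hc
                exact ⟨fun p hp => hRdone p hp,
                  fun q hq => le_trans hcs_s (hhead q hq)⟩)
              (by intro h; cases h)
            refine ⟨hres.1, fun i => ?_⟩
            rw [(hres.2 i)]
            constructor
            · rintro (h | ⟨c, hc, hcov⟩ | h)
              · exact Or.inl h
              · obtain rfl : (cs, max ce e) = c := by injection hc
                simp only [] at hcov
                rcases le_max_iff.mp hcov.2 with hice | hie
                · exact Or.inr (Or.inl ⟨(cs, ce), rfl, hcov.1, hice⟩)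
                · by_cases hice2 : i ≤ ce
                  · exact Or.inr (Or.inl ⟨(cs, ce), rfl, hcov.1, hice2⟩)
                  · refine Or.inr (Or.inr ⟨(s, e), List.mem_cons_self .., ?_, hie⟩)
                    omega
              · exact Or.inr (Or.inr (by rcases h with ⟨p, hp, hc⟩; exact ⟨p, List.mem_cons_of_mem _ hp, hc⟩))
            · rintro (h | ⟨c, hc, hcov⟩ | ⟨p, hp, hcov⟩)
              · exact Or.inl h
              · obtain rfl : (cs, ce) = c := by injection hc
                exact Or.inr (Or.inl ⟨(cs, max ce e), rfl, hcov.1, le_trans hcov.2 (le_max_left ..)⟩)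
              · rcases List.mem_cons.mp hp with rfl | hp
                · refine Or.inr (Or.inl ⟨(cs, max ce e), rfl, ?_, ?_⟩) <;> simp only [] <;> omega
                · exact Or.inr (Or.inr ⟨p, hp, hcov⟩)
          · -- push the current interval and open a new one
            have hstep : (((s, e) :: t).foldl solveMergeStep (done, some (cs, ce))) =
                t.foldl solveMergeStep (done ++ [(cs, ce)], some (s, e)) := by
              simp [solveMergeStep, hov]
            rw [hstep]
            have hres := ih (done ++ [(cs, ce)]) (some (s, e)) ht
              (by
                refine List.pairwise_append.mpr ⟨hdone, by simp, ?_⟩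
                intro p hp q hq
                simp only [List.mem_singleton] at hq
                subst hq
                exact hRdone p hp)
              (by
                intro c hc; injection hc with hc; subst hc
                refine ⟨?_, fun q hq => hhead q hq⟩
                intro p hp
                rcases List.mem_append.mp hp with hp | hp
                · obtain ⟨h1, h2⟩ := hRdone p hp
                  exact ⟨by omega, by omega⟩
                · simp only [List.mem_singleton] at hp
                  subst hp
                  exact ⟨hcs_s, by omega⟩)
              (by intro h; cases h)
            refine ⟨hres.1, fun i => ?_⟩
            rw [(hres.2 i)]
            constructor
            · rintro (⟨p, hp, hcov⟩ | ⟨c, hc, hcov⟩ | ⟨p, hp, hcov⟩)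
              · rcases List.mem_append.mp hp with hp | hp
                · exact Or.inl ⟨p, hp, hcov⟩
                · simp only [List.mem_singleton] at hp
                  subst hp
                  exact Or.inr (Or.inl ⟨(cs, ce), rfl, hcov⟩)
              · obtain rfl : (s, e) = c := by injection hc
                exact Or.inr (Or.inr ⟨(s, e), List.mem_cons_self .., hcov⟩)
              · exact Or.inr (Or.inr ⟨p, List.mem_cons_of_mem _ hp, hcov⟩)
            · rintro (⟨p, hp, hcov⟩ | ⟨c, hc, hcov⟩ | ⟨p, hp, hcov⟩)
              · exact Or.inl ⟨p, List.mem_append.mpr (Or.inl hp), hcov⟩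
              · obtain rfl : (cs, ce) = c := by injection hc
                exact Or.inl ⟨(cs, ce), List.mem_append.mpr (Or.inr (by simp)), hcov⟩
              · rcases List.mem_cons.mp hp with rfl | hp
                · exact Or.inr (Or.inl ⟨(s, e), rfl, hcov⟩)
                · exact Or.inr (Or.inr ⟨p, hp, hcov⟩)

lemma bisect_cov (merged : List (Int × Int)) (hP : merged.Pairwise solveMergeRel) (i : Int) :
    (0 < PySem.List.bisectRight (merged.map (fun p => p.1)) i ∧
      i ≤ (merged.getD (PySem.List.bisectRight (merged.map (fun p => p.1)) i - 1) (0, 0)).2) ↔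
    ∃ p ∈ merged, p.1 ≤ i ∧ i ≤ p.2 := by
  set starts := merged.map (fun p => p.1) with hst
  have hsorted : starts.Pairwise (· ≤ ·) := by
    rw [hst]; exact List.Pairwise.map _ (fun {a b} h => h.1) hP
  obtain ⟨hle, hlt, hgt⟩ := PySem.List.bisectRight_spec starts i hsorted
  set j := PySem.List.bisectRight starts i with hj
  have hlen : starts.length = merged.length := by rw [hst]; exact List.length_map ..
  constructor
  · rintro ⟨hpos, hcov⟩
    have hjm : j - 1 < merged.length := by omega
    refine ⟨merged[j - 1], List.getElem_mem _, ?_, ?_⟩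
    · have h1 := hlt (j - 1) (by omega) (by omega)
      simpa [hst] using h1
    · rwa [List.getD_eq_getElem _ _ hjm] at hcov
  · rintro ⟨p, hp, h1, h2⟩
    obtain ⟨k, hk, rfl⟩ := List.mem_iff_getElem.mp hp
    have hkj : k < j := by
      by_contra h
      have h3 := hgt k (by omega) (by omega)
      rw [show starts[k]'(by omega) = merged[k].1 from by simp [hst]] at h3
      omega
    have hpos : 0 < j := by omega
    have hkeq : k = j - 1 := by
      by_contra hne
      have hjm : j - 1 < merged.length := by omega
      have hR := (List.pairwise_iff_getElem.mp hP) k (j - 1) hk hjm (by omega)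
      have hs := hlt (j - 1) (by omega) (by omega)
      rw [show starts[j - 1]'(by omega) = (merged[j - 1]'hjm).1 from by simp [hst]] at hs
      obtain ⟨_, h3⟩ := hR
      omega
    subst hkeq
    exact ⟨hpos, by rw [List.getD_eq_getElem _ _ (by omega)]; exact h2⟩

lemma foldl_add_eq_sum (f : List Int → Int) (l : List (List Int)) (a : Int) :
    l.foldl (fun s r => s + f r) a = a + (l.map f).sum := by
  induction l generalizing a with
  | nil => simp
  | cons r t ih => simp [ih, List.sum_cons]; ring

lemma foldl_congr2 (f g : Int → Int → Int) (h : ∀ a i, f a i = g a i)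
    (l : List Int) (a : Int) : l.foldl f a = l.foldl g a := by
  have hfg : f = g := funext fun a => funext (h a)
  rw [hfg]

lemma count_step (ranges : List (List Int)) (i a : Int) (C : Prop) [Decidable C]
    (hC : C ↔ ∃ p ∈ ranges.map (fun r => (PySem.List.pyGetD r 0 0, PySem.List.pyGetD r 1 0)),
        p.1 ≤ i ∧ i ≤ p.2) :
    a + solveScanA ranges i = if C then a + 1 else a := by
  rw [scanA_eq]
  by_cases h : ∃ p ∈ ranges.map (fun r => (PySem.List.pyGetD r 0 0, PySem.List.pyGetD r 1 0)),
      p.1 ≤ i ∧ i ≤ p.2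
  · rw [if_pos (hC.mpr h), if_pos]
    rw [List.any_eq_true]
    rcases h with ⟨p, hp, hc⟩
    exact ⟨p, hp, by simpa using hc⟩
  · rw [if_neg (fun hc => h (hC.mp hc)), if_neg, add_zero]
    rw [List.any_eq_true]
    rintro ⟨p, hp, hc⟩
    exact h ⟨p, hp, by simpa using hc⟩

-- ===== VERDICT (by name: the statement is the Claim_ definition above) =====
theorem solve_spec : Claim_equal_solve := by
  intro ranges inputs part_2 _ hpre
  unfold Spec_solve
  cases part_2 with
  | true =>
      simp only [solve, solve_alt, if_pos]
      rw [foldl_add_eq_sum, zero_add]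
  | false =>
      simp only [solve, solve_alt, Bool.false_eq_true, if_neg, not_false_iff]
      set pairs := ranges.map (fun r => (PySem.List.pyGetD r 0 0, PySem.List.pyGetD r 1 0))
        with hpairs
      set intervals := PySem.List.sorted pairs (fun t => t.1) with hint
      set merged := solveMergeFin (intervals.foldl solveMergeStep ([], none)) with hmerged
      have hsortP : intervals.Pairwise (fun a b => a.1 ≤ b.1) := by
        rw [hint]; exact PySem.List.sorted_pairwise pairs (fun t => t.1)
      have hmm := merge_main intervals [] none hsortP (by simp)
        (by intro c h; cases h) (fun _ => rfl)
      apply foldl_congr2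
      intro a i
      refine count_step ranges i a _ ?_
      rw [bisect_cov merged hmm.1 i, hmm.2 i]
      simp only [List.not_mem_nil, false_and, exists_false, reduceCtorEq,
        false_or, ← hpairs]
      constructor
      · rintro ⟨p, hp, hc⟩
        exact ⟨p, (PySem.List.mem_sorted _ _ _ _).mp hp, hc⟩
      · rintro ⟨p, hp, hc⟩
        exact ⟨p, (PySem.List.mem_sorted _ _ _ _).mpr hp, hc⟩
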